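-- pv_equiv track=rewrite | github.com/kevinksaji/Year-2-Sem-2 | Design and Analysis of Algorithms (CS202)/Assignment 2/A2Q2.py | LCMS
-- ===== SOURCE A (Python) =====
-- def LCMS(a, b):
--     m, n = len(a), len(b)
--
--     # initialize m x n matrices for increasing and decreasing sequences
--     inc_seq = [[0] * n for _ in range(m)]
--     dec_seq = [[0] * n for _ in range(m)]
--
--     # map each common element in a and b to its corresponding index in b. the key is the element in b,
--     # the value is a list of indices where that element is present in b (there can be duplicate common elements)
--     b_map = {}
--     for i, x in enumerate(b):
--         if x in b_map:
--             b_map[x].append(i) # append the index to the list of indices if the element is already in the map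
--         else:
--             b_map[x] = [i] # create a new list with the index if the element is not in the map
--
--     # Chat GPT prompt: What would be the approach to find the longest increasing sequence to each element in an integer array?
--
--     # fill inc_seq with lengths of increasing subsequences ending at position i
--     for i in range(m):
--         for j in range(n):
--             if a[i] == b[j]: # if the element is common to both a and b
--                 inc_seq[i][j] = 1  # base case (length of increasing subsequence is 1)
--                 for k in range(i):
--                     if a[k] in b_map: # if there is a common element to the left of i
--                         for l in b_map[a[k]]: # look at the indices of the common element in b
--                             if l < j and a[k] < a[i]: # make sure the index in b is smaller than j to preserve order and the element is smaller than the one at a[i] (increasing sequence to i)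
--                                 inc_seq[i][j] = max(inc_seq[i][j], inc_seq[k][l] + 1)
--
--
--     # Chat GPT prompt: So if i wanted to find the longest decreasing sequence from each element,
--     # the approach would be similar but just looking at all the elements after i instead of before,
--     #to find the optimised sub problem?
--
--
--     # fill dec_seq with lengths of decreasing subsequences starting at position i
--     for i in reversed(range(m)): # iterate in revesed order
--         for j in reversed(range(n)):
--             if a[i] == b[j]: # if the element is common to both a and b
--                 dec_seq[i][j] = 1  # base case (length of decreasing subsequence is 1)
--                 for k in range(i+1, m):
--                     if a[k] in b_map: # if there is a common element to the right
--                         for l in b_map[a[k]]: # look at the indices of the common element in b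
--                             if l > j and a[k] < a[i]: # make sure the index in b is larger than j and the element is smaller than the one at a[i] (decreasing sequence away from i)
--                                 dec_seq[i][j] = max(dec_seq[i][j], dec_seq[k][l] + 1)
--
--     # Compute LCMS
--     max_length = 0 # initialise max length of the mountain sequence
--
--     for i in range(m):
--         for j in range(n):
--             if a[i] == b[j] and inc_seq[i][j] > 1 and dec_seq[i][j] > 1: # if the element is a possible peak (at least 2 elements in both increasing and decreasing sequence)
--                 max_length = max(max_length, inc_seq[i][j] + dec_seq[i][j] - 1) # -1 because the peak element is counted twice
--
--     return max_length
-- ===== SOURCE B (Python) =====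
-- def LCMS(a, b):
--     # LCIS-style O(m*n) DP: one helper computes, for each matching pair (i, j),
--     # the length of the longest common strictly-increasing subsequence ending
--     # there, using a rolling row scan instead of A's O(m*n) inner rescans.
--     def table(a, b):
--         m, n = len(a), len(b)
--         inc = [[0] * n for _ in range(m)]
--         dp = [0] * n  # dp[j] = best LCIS ending at b[j] over rows processed so far
--         for i in range(m):
--             cur = 0  # best dp[j'] with j' < j and b[j'] < a[i]
--             for j in range(n):
--                 if a[i] == b[j]:
--                     inc[i][j] = cur + 1
--                     if dp[j] < cur + 1:
--                         dp[j] = cur + 1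
--                 elif b[j] < a[i]:
--                     if cur < dp[j]:
--                         cur = dp[j]
--         return inc
--
--     inc = table(a, b)
--     rev = table(a[::-1], b[::-1])
--     m, n = len(a), len(b)
--     best = 0
--     for i in range(m):
--         for j in range(n):
--             u = inc[i][j]
--             d = rev[m - 1 - i][n - 1 - j]
--             if u > 1 and d > 1:
--                 best = max(best, u + d - 1)
--     return best
-- ===== Notes on version B (the rewrite author's own statement) =====
-- stated objective: faster
-- what changed: Replaces A's per-cell rescan of all earlier matching pairs (via b_map) with an LCIS-style rolling best-per-column array dp plus a running row maximum cur, computed by one O(mn) table helper applied to the arrays and to their reversals.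
import Mathlib
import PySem

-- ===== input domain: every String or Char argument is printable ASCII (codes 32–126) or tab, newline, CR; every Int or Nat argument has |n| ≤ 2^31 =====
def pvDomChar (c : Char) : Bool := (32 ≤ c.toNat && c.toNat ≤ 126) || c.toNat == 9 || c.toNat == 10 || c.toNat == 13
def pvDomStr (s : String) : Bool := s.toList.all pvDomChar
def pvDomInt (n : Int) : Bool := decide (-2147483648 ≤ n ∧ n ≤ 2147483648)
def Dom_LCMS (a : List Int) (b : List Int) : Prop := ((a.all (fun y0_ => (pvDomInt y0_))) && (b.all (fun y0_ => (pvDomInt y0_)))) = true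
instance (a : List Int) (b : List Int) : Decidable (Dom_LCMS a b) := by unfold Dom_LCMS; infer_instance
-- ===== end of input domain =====

-- B replaces A's O(m^2 n^2) per-cell rescans with one LCIS-style O(mn) rolling-maximum
-- table helper applied to the arrays and to their reversals (objective: faster, asymptotic).

-- shared 2-D list accessors (Python t[i][j] read / t[i][j] = v write)
def pvGet2 (t : List (List Int)) (i j : Int) : Int :=
  PySem.List.pyGetD (PySem.List.pyGetD t i []) j 0

def pvSet2 (t : List (List Int)) (i j : Int) (v : Int) : List (List Int) :=
  PySem.List.pySetD t i (PySem.List.pySetD (PySem.List.pyGetD t i []) j v)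

-- ===== PORT A =====

-- b_map: element of b ↦ list of its indices in b, in order
def pvBmap (b : List Int) : PySem.Dict Int (List Int) :=
  (PySem.List.enumerate b 0).foldl
    (fun d p =>
      if d.contains p.2 then d.insert p.2 (d.getD p.2 [] ++ [p.1])
      else d.insert p.2 [p.1])
    PySem.Dict.empty

-- the inc_seq-filling double loop of A
def pvIncA (a b : List Int) : List (List Int) :=
  let m : Int := a.length
  let n : Int := b.length
  let bm := pvBmap b
  (PySem.List.pyRange 0 m 1).foldl (fun t i =>
    (PySem.List.pyRange 0 n 1).foldl (fun t j =>
      if PySem.List.pyGetD a i 0 = PySem.List.pyGetD b j 0 then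
        let t := pvSet2 t i j 1
        (PySem.List.pyRange 0 i 1).foldl (fun t k =>
          if bm.contains (PySem.List.pyGetD a k 0) then
            (bm.getD (PySem.List.pyGetD a k 0) []).foldl (fun t l =>
              if l < j ∧ PySem.List.pyGetD a k 0 < PySem.List.pyGetD a i 0 then
                pvSet2 t i j (max (pvGet2 t i j) (pvGet2 t k l + 1))
              else t) t
          else t) t
      else t) t)
    ((PySem.List.pyRange 0 m 1).map (fun _ => List.replicate b.length (0 : Int)))

-- the dec_seq-filling double loop of A (reversed iteration)
def pvDecA (a b : List Int) : List (List Int) :=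
  let m : Int := a.length
  let n : Int := b.length
  let bm := pvBmap b
  ((PySem.List.pyRange 0 m 1).reverse).foldl (fun t i =>
    ((PySem.List.pyRange 0 n 1).reverse).foldl (fun t j =>
      if PySem.List.pyGetD a i 0 = PySem.List.pyGetD b j 0 then
        let t := pvSet2 t i j 1
        (PySem.List.pyRange (i + 1) m 1).foldl (fun t k =>
          if bm.contains (PySem.List.pyGetD a k 0) then
            (bm.getD (PySem.List.pyGetD a k 0) []).foldl (fun t l =>
              if j < l ∧ PySem.List.pyGetD a k 0 < PySem.List.pyGetD a i 0 then
                pvSet2 t i j (max (pvGet2 t i j) (pvGet2 t k l + 1))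
              else t) t
          else t) t
      else t) t)
    ((PySem.List.pyRange 0 m 1).map (fun _ => List.replicate b.length (0 : Int)))

def LCMS (a : List Int) (b : List Int) : Int :=
  let m : Int := a.length
  let n : Int := b.length
  let inc := pvIncA a b
  let dec := pvDecA a b
  (PySem.List.pyRange 0 m 1).foldl (fun acc i =>
    (PySem.List.pyRange 0 n 1).foldl (fun acc j =>
      if PySem.List.pyGetD a i 0 = PySem.List.pyGetD b j 0 ∧
         1 < pvGet2 inc i j ∧ 1 < pvGet2 dec i j then
        max acc (pvGet2 inc i j + pvGet2 dec i j - 1)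
      else acc) acc) 0

-- ===== PORT B =====

-- B's helper table(a, b): inc[i][j] via rolling dp/cur (LCIS-style)
def pvTable (a b : List Int) : List (List Int) :=
  let m : Int := a.length
  let n : Int := b.length
  ((PySem.List.pyRange 0 m 1).foldl (fun (st : List (List Int) × List Int) i =>
    let r := (PySem.List.pyRange 0 n 1).foldl
      (fun (s : List (List Int) × List Int × Int) j =>
        if PySem.List.pyGetD a i 0 = PySem.List.pyGetD b j 0 then
          (pvSet2 s.1 i j (s.2.2 + 1),
           (if PySem.List.pyGetD s.2.1 j 0 < s.2.2 + 1 then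
              PySem.List.pySetD s.2.1 j (s.2.2 + 1) else s.2.1),
           s.2.2)
        else if PySem.List.pyGetD b j 0 < PySem.List.pyGetD a i 0 then
          (s.1, s.2.1,
           (if s.2.2 < PySem.List.pyGetD s.2.1 j 0 then PySem.List.pyGetD s.2.1 j 0 else s.2.2))
        else s)
      (st.1, st.2, 0)
    (r.1, r.2.1))
    ((PySem.List.pyRange 0 m 1).map (fun _ => List.replicate b.length (0 : Int)),
     List.replicate b.length (0 : Int))).1

def LCMS_alt (a : List Int) (b : List Int) : Int :=
  let inc := pvTable a b
  let rev := pvTable ((PySem.List.slice? a none none (-1)).getD [])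
                     ((PySem.List.slice? b none none (-1)).getD [])
  let m : Int := a.length
  let n : Int := b.length
  (PySem.List.pyRange 0 m 1).foldl (fun best i =>
    (PySem.List.pyRange 0 n 1).foldl (fun best j =>
      let u := pvGet2 inc i j
      let d := pvGet2 rev (m - 1 - i) (n - 1 - j)
      if 1 < u ∧ 1 < d then max best (u + d - 1) else best) best) 0

-- ===== PRECONDITION & SPEC =====
def Spec_LCMS (a : List Int) (b : List Int) (out : Int) : Prop := out = LCMS_alt a b
instance (a : List Int) (b : List Int) (out : Int) : Decidable (Spec_LCMS a b out) := by unfold Spec_LCMS; infer_instance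

-- ===== CLAIM (what is proved, stated in full; the proofs are below) =====
def Claim_equal_LCMS : Prop := ∀ (a : List Int) (b : List Int), Dom_LCMS a b → Spec_LCMS a b (LCMS a b)

-- ===== LEMMAS AND PROOFS =====

-- conditional running maximum: the value every loop of both programs computes
def pvCmax {α : Type} (l : List α) (c : α → Prop) [DecidablePred c] (f : α → Int) (init : Int) : Int :=
  l.foldl (fun acc x => if c x then max acc (f x) else acc) init

theorem le_pvCmax_init {α : Type} (l : List α) (c : α → Prop) [DecidablePred c] (f : α → Int) (init : Int) :
    init ≤ pvCmax l c f init := by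
  induction l generalizing init with
  | nil => simp [pvCmax]
  | cons y t ih =>
    simp only [pvCmax, List.foldl_cons]
    refine le_trans ?_ (ih _)
    split <;> simp

theorem le_pvCmax_of_mem {α : Type} {l : List α} {c : α → Prop} [DecidablePred c] {f : α → Int} {init : Int}
    {x : α} (hx : x ∈ l) (hc : c x) : f x ≤ pvCmax l c f init := by
  induction l generalizing init with
  | nil => simp at hx
  | cons y t ih =>
    simp only [pvCmax, List.foldl_cons]
    rcases List.mem_cons.mp hx with h | h
    · subst h
      refine le_trans ?_ (le_pvCmax_init t c f _)
      simp [hc]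
    · exact ih h

theorem pvCmax_le {α : Type} {l : List α} {c : α → Prop} [DecidablePred c] {f : α → Int} {init M : Int}
    (h0 : init ≤ M) (h : ∀ x ∈ l, c x → f x ≤ M) : pvCmax l c f init ≤ M := by
  induction l generalizing init with
  | nil => simpa [pvCmax] using h0
  | cons y t ih =>
    simp only [pvCmax, List.foldl_cons]
    refine ih ?_ (fun x hx hc => h x (List.mem_cons_of_mem _ hx) hc)
    split
    · exact max_le h0 (h y (List.mem_cons_self) (by assumption))
    · exact h0

theorem pvCmax_cases {α : Type} (l : List α) (c : α → Prop) [DecidablePred c] (f : α → Int) (init : Int) :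
    pvCmax l c f init = init ∨ ∃ x ∈ l, c x ∧ pvCmax l c f init = f x := by
  induction l generalizing init with
  | nil => simp [pvCmax]
  | cons y t ih =>
    have hcons : pvCmax (y :: t) c f init
        = pvCmax t c f (if c y then max init (f y) else init) := rfl
    rw [hcons]
    by_cases hy : c y
    · simp only [if_pos hy]
      rcases ih (init := max init (f y)) with h | ⟨x, hx, hc, he⟩
      · rcases max_cases init (f y) with ⟨he, _⟩ | ⟨he, _⟩
        · left; rw [h, he]
        · right; exact ⟨y, List.mem_cons_self, hy, by rw [h, he]⟩
      · right; exact ⟨x, List.mem_cons_of_mem _ hx, hc, he⟩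
    · simp only [if_neg hy]
      rcases ih (init := init) with h | ⟨x, hx, hc, he⟩
      · left; exact h
      · right; exact ⟨x, List.mem_cons_of_mem _ hx, hc, he⟩

theorem pvCmax_append_singleton {α : Type} (l : List α) (x : α) (c : α → Prop) [DecidablePred c]
    (f : α → Int) (init : Int) :
    pvCmax (l ++ [x]) c f init = if c x then max (pvCmax l c f init) (f x) else pvCmax l c f init := by
  simp [pvCmax, List.foldl_append]

theorem pvCmax_congr {α : Type} {l : List α} {c c' : α → Prop} [DecidablePred c] [DecidablePred c']
    {f f' : α → Int} {init : Int}
    (hc : ∀ x ∈ l, c x ↔ c' x) (hf : ∀ x ∈ l, c x → f x = f' x) :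
    pvCmax l c f init = pvCmax l c' f' init := by
  unfold pvCmax
  refine PySem.List.foldl_congr_mem _ _ _ _ (fun acc x hx => ?_)
  by_cases h : c x
  · rw [if_pos h, if_pos ((hc x hx).mp h), hf x hx h]
  · rw [if_neg h, if_neg (fun h' => h ((hc x hx).mpr h'))]

-- candidate pairs (k, l) with k < i, l < j
def pvCands (i j : Nat) : List (Nat × Nat) :=
  (List.range i).flatMap (fun k => (List.range j).map (fun l => (k, l)))

theorem mem_pvCands {i j : Nat} {p : Nat × Nat} : p ∈ pvCands i j ↔ p.1 < i ∧ p.2 < j := by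
  obtain ⟨k, l⟩ := p
  simp [pvCands, List.mem_flatMap]

-- the reference table, built row by row (row i only reads rows < i)
def pvRowS (a b : List Int) (prev : List (List Int)) (i : Nat) : List Int :=
  (List.range b.length).map (fun j =>
    1 + pvCmax (pvCands i j)
      (fun p => b.getD p.2 0 = a.getD p.1 0 ∧ a.getD p.1 0 < a.getD i 0)
      (fun p => (prev.getD p.1 []).getD p.2 0) 0)

def pvTabS (a b : List Int) : Nat → List (List Int)
  | 0 => []
  | i + 1 => pvTabS a b i ++ [pvRowS a b (pvTabS a b i) i]

-- T a b i j: length of the longest common strictly increasing subsequence of a, b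
-- ending at the pair (i, j) (meaningful when a[i] = b[j])
def pvT (a b : List Int) (i j : Nat) : Int := (pvRowS a b (pvTabS a b i) i).getD j 0

def pvS (a b : List Int) (i j : Nat) : Int :=
  pvCmax (pvCands i j)
    (fun p => b.getD p.2 0 = a.getD p.1 0 ∧ a.getD p.1 0 < a.getD i 0)
    (fun p => pvT a b p.1 p.2) 0

theorem length_pvTabS (a b : List Int) (i : Nat) : (pvTabS a b i).length = i := by
  induction i with
  | zero => rfl
  | succ i ih => simp [pvTabS, ih]

theorem pvTabS_getD {a b : List Int} {i k : Nat} (hk : k < i) :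
    (pvTabS a b i).getD k [] = pvRowS a b (pvTabS a b k) k := by
  induction i with
  | zero => omega
  | succ i ih =>
    rcases Nat.lt_succ_iff_lt_or_eq.mp hk with h | h
    · rw [pvTabS, List.getD_append _ _ _ _ (by rw [length_pvTabS]; exact h)]
      exact ih h
    · subst h
      rw [pvTabS, List.getD_eq_getElem?_getD, List.getElem?_append_right (by rw [length_pvTabS])]
      simp [length_pvTabS]

theorem pvT_eq {a b : List Int} {i j : Nat} (hj : j < b.length) :
    pvT a b i j = 1 + pvS a b i j := by
  unfold pvT pvRowS
  rw [List.getD_eq_getElem?_getD, List.getElem?_map, List.getElem?_range hj]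
  simp only [Option.map_some, Option.getD_some]
  congr 1
  unfold pvS
  refine pvCmax_congr (fun p _ => Iff.rfl) (fun p hp hc => ?_)
  have hk : p.1 < i := (mem_pvCands.mp hp).1
  rw [pvTabS_getD hk]
  rfl

theorem pvS_nonneg (a b : List Int) (i j : Nat) : 0 ≤ pvS a b i j :=
  le_pvCmax_init _ _ _ _

theorem one_le_pvT {a b : List Int} {i j : Nat} (hj : j < b.length) : 1 ≤ pvT a b i j := by
  rw [pvT_eq hj]
  have := pvS_nonneg a b i j
  omega

set_option maxHeartbeats 1000000 in
theorem le_pvS {a b : List Int} {i j k l : Nat} (hk : k < i) (hl : l < j)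
    (hc : b.getD l 0 = a.getD k 0 ∧ a.getD k 0 < a.getD i 0) :
    pvT a b k l ≤ pvS a b i j := by
  unfold pvS
  exact le_pvCmax_of_mem
    (c := fun p => b.getD p.2 0 = a.getD p.1 0 ∧ a.getD p.1 0 < a.getD i 0)
    (f := fun p => pvT a b p.1 p.2) (x := (k, l))
    (mem_pvCands.mpr ⟨hk, hl⟩) hc

theorem pvS_cases (a b : List Int) (i j : Nat) :
    pvS a b i j = 0 ∨ ∃ k l, k < i ∧ l < j ∧
      (b.getD l 0 = a.getD k 0 ∧ a.getD k 0 < a.getD i 0) ∧ pvS a b i j = pvT a b k l := by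
  rcases pvCmax_cases (pvCands i j)
      (fun p => b.getD p.2 0 = a.getD p.1 0 ∧ a.getD p.1 0 < a.getD i 0)
      (fun p => pvT a b p.1 p.2) 0 with h | ⟨p, hp, hc, he⟩
  · exact Or.inl h
  · exact Or.inr ⟨p.1, p.2, (mem_pvCands.mp hp).1, (mem_pvCands.mp hp).2, hc, he⟩


-- intended-shape tables: m × n matrix given by an entry function
def pvMkTab (m n : Nat) (g : Nat → Nat → Int) : List (List Int) :=
  (List.range m).map (fun k => (List.range n).map (fun l => g k l))

theorem getD_pvMkTab {m n : Nat} {g : Nat → Nat → Int} {k : Nat} (hk : k < m) :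
    (pvMkTab m n g).getD k [] = (List.range n).map (g k) := by
  unfold pvMkTab
  rw [PySem.List.getD_map_range _ _ _ _ hk]

theorem pvGet2_mkTab {m n : Nat} {g : Nat → Nat → Int} {k l : Nat} (hk : k < m) (hl : l < n) :
    pvGet2 (pvMkTab m n g) (k : Int) (l : Int) = g k l := by
  simp only [pvGet2, PySem.List.pyGetD_natCast]
  rw [getD_pvMkTab hk, PySem.List.getD_map_range _ _ _ _ hl]

theorem pvGet2_mkTab_int {m n : Nat} {g : Nat → Nat → Int} {x y : Int}
    (hx0 : 0 ≤ x) (hxm : x < (m : Int)) (hy0 : 0 ≤ y) (hyn : y < (n : Int)) :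
    pvGet2 (pvMkTab m n g) x y = g x.toNat y.toNat := by
  have hx : x = ((x.toNat : Nat) : Int) := by omega
  have hy : y = ((y.toNat : Nat) : Int) := by omega
  rw [hx, hy]
  exact pvGet2_mkTab (by omega) (by omega)

theorem pvMkTab_congr {m n : Nat} {g g' : Nat → Nat → Int}
    (h : ∀ k < m, ∀ l < n, g k l = g' k l) : pvMkTab m n g = pvMkTab m n g' := by
  unfold pvMkTab
  refine List.map_congr_left (fun k hk => ?_)
  exact List.map_congr_left (fun l hl => h k (List.mem_range.mp hk) l (List.mem_range.mp hl))

theorem pvSet2_mkTab {m n : Nat} {g : Nat → Nat → Int} {i j : Nat} (hi : i < m) (_hj : j < n) (v : Int) :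
    pvSet2 (pvMkTab m n g) (i : Int) (j : Int) v
      = pvMkTab m n (fun k l => if k = i ∧ l = j then v else g k l) := by
  simp only [pvSet2, PySem.List.pySetD_natCast, PySem.List.pyGetD_natCast]
  rw [getD_pvMkTab hi]
  unfold pvMkTab
  refine List.ext_getElem (by simp) (fun k hk1 hk2 => ?_)
  rw [List.getElem_set]
  simp only [List.getElem_map, List.getElem_range]
  by_cases hki : i = k
  · subst hki
    rw [if_pos rfl]
    refine List.ext_getElem (by simp) (fun l hl1 hl2 => ?_)
    rw [List.getElem_set]
    simp only [List.getElem_map, List.getElem_range]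
    by_cases hlj : j = l
    · subst hlj
      simp
    · rw [if_neg hlj, if_neg (by omega)]
  · rw [if_neg hki]
    refine List.map_congr_left (fun l _ => ?_)
    rw [if_neg (by omega)]

-- the initial all-zero table of both programs
theorem pvZeroTab (m : Nat) (b : List Int) :
    ((PySem.List.pyRange 0 (m : Int) 1).map (fun _ => List.replicate b.length (0 : Int)))
      = pvMkTab m b.length (fun _ _ => 0) := by
  unfold pvMkTab
  rw [PySem.List.pyRange_zero_nat, List.map_map]
  refine List.map_congr_left (fun k _ => ?_)
  simp [List.map_const']

-- b_map sends v to the list of indices l (in order) with b[l] = v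
theorem mem_pvBmap {b : List Int} {v x : Int} :
    x ∈ (pvBmap b).getD v [] ↔ ∃ l : Nat, l < b.length ∧ x = (l : Int) ∧ b.getD l 0 = v := by
  have hstep : pvBmap b
      = (PySem.List.enumerate b 0).foldl (fun d p => d.modify p.2 [] (· ++ [p.1])) PySem.Dict.empty := by
    unfold pvBmap
    refine PySem.List.foldl_congr_mem _ _ _ _ (fun d p _ => ?_)
    by_cases hc : d.contains p.2
    · rw [if_pos hc]; rfl
    · rw [if_neg (by simp [hc])]
      show _ = d.insert p.2 ((d.getD p.2 []) ++ [p.1])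
      rw [PySem.Dict.getD_of_not_contains _ _ (by simp [hc])]
      rfl
  have hmap : (PySem.List.enumerate b 0).foldl (fun d p => d.modify p.2 [] (· ++ [p.1]))
        (PySem.Dict.empty : PySem.Dict Int (List Int))
      = ((PySem.List.enumerate b 0).map (fun p => (p.2, p.1))).foldl
          (fun d q => d.modify q.1 [] (· ++ [q.2])) PySem.Dict.empty := by
    rw [List.foldl_map]
  rw [hstep, hmap, PySem.Dict.getD_foldl_modify_append]
  simp only [PySem.Dict.getD_empty, List.nil_append, List.mem_map, List.mem_filter,
    PySem.List.mem_enumerate_iff]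
  constructor
  · rintro ⟨q, ⟨⟨p, ⟨k, hk, hp⟩, hq⟩, hfil⟩, hx⟩
    subst hp hq
    refine ⟨k, hk, by simpa using hx.symm, ?_⟩
    rw [List.getD_eq_getElem _ _ hk]
    simpa using beq_iff_eq.mp hfil
  · rintro ⟨l, hl, hx, hb⟩
    refine ⟨((b[l] : Int), (l : Int)), ⟨⟨((l : Int), b[l]), ⟨l, hl, by simp⟩, rfl⟩, ?_⟩, by simpa using hx.symm⟩
    rw [List.getD_eq_getElem _ _ hl] at hb
    simpa using hb

-- reading a reversed list
theorem getD_reverse {a : List Int} {k : Nat} (hk : k < a.length) :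
    a.reverse.getD (a.length - 1 - k) 0 = a.getD k 0 := by
  have h1 : a.length - 1 - k < a.reverse.length := by simp; omega
  rw [List.getD_eq_getElem _ _ h1, List.getD_eq_getElem _ _ hk, List.getElem_reverse]
  congr 1
  omega

-- one full run of A's k/l update loop on cell (I, J), as a single assignment
theorem pvSet2_loop {m n : Nat} (L : List (Int × Int)) (c : Int × Int → Prop) [DecidablePred c]
    {I J : Nat} (hI : I < m) (hJ : J < n)
    (hL : ∀ p ∈ L, c p → 0 ≤ p.1 ∧ p.1 < (m : Int) ∧ 0 ≤ p.2 ∧ p.2 < (n : Int) ∧ p.1 ≠ (I : Int))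
    (g : Nat → Nat → Int) :
    L.foldl (fun t p =>
        if c p then pvSet2 t (I : Int) (J : Int) (max (pvGet2 t (I : Int) (J : Int)) (pvGet2 t p.1 p.2 + 1))
        else t) (pvMkTab m n g)
    = pvSet2 (pvMkTab m n g) (I : Int) (J : Int)
        (pvCmax L c (fun p => pvGet2 (pvMkTab m n g) p.1 p.2 + 1) (pvGet2 (pvMkTab m n g) (I : Int) (J : Int))) := by
  induction L generalizing g with
  | nil =>
    simp only [List.foldl_nil, pvCmax]
    rw [pvSet2_mkTab hI hJ, pvGet2_mkTab hI hJ]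
    refine Eq.symm (Eq.trans (pvMkTab_congr (fun k hk l hl => ?_)) rfl)
    by_cases hkl : k = I ∧ l = J
    · obtain ⟨h1, h2⟩ := hkl
      subst h1; subst h2
      simp
    · rw [if_neg hkl]
  | cons p rest ih =>
    have hcons : ∀ (f : Int × Int → Int) (init : Int),
        pvCmax (p :: rest) c f init = pvCmax rest c f (if c p then max init (f p) else init) := by
      intro f init; rfl
    rw [List.foldl_cons, hcons]
    by_cases hc : c p
    · obtain ⟨h1, h2, h3, h4, h5⟩ := hL p List.mem_cons_self hc
      rw [if_pos hc, if_pos hc]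
      rw [pvSet2_mkTab hI hJ]
      rw [ih (fun q hq hcq => hL q (List.mem_cons_of_mem _ hq) hcq) _]
      have hg1IJ : pvGet2 (pvMkTab m n
            (fun k l => if k = I ∧ l = J then
              max (pvGet2 (pvMkTab m n g) (I : Int) (J : Int)) (pvGet2 (pvMkTab m n g) p.1 p.2 + 1)
            else g k l)) (I : Int) (J : Int)
          = max (pvGet2 (pvMkTab m n g) (I : Int) (J : Int)) (pvGet2 (pvMkTab m n g) p.1 p.2 + 1) := by
        rw [pvGet2_mkTab hI hJ]
        simp
      rw [hg1IJ]
      have hcongr : pvCmax rest c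
          (fun q => pvGet2 (pvMkTab m n
            (fun k l => if k = I ∧ l = J then
              max (pvGet2 (pvMkTab m n g) (I : Int) (J : Int)) (pvGet2 (pvMkTab m n g) p.1 p.2 + 1)
            else g k l)) q.1 q.2 + 1)
          (max (pvGet2 (pvMkTab m n g) (I : Int) (J : Int)) (pvGet2 (pvMkTab m n g) p.1 p.2 + 1))
        = pvCmax rest c (fun q => pvGet2 (pvMkTab m n g) q.1 q.2 + 1)
          (max (pvGet2 (pvMkTab m n g) (I : Int) (J : Int)) (pvGet2 (pvMkTab m n g) p.1 p.2 + 1)) := by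
        refine pvCmax_congr (fun q _ => Iff.rfl) (fun q hq hcq => ?_)
        obtain ⟨g1, g2, g3, g4, g5⟩ := hL q (List.mem_cons_of_mem _ hq) hcq
        rw [pvGet2_mkTab_int g1 g2 g3 g4, pvGet2_mkTab_int g1 g2 g3 g4]
        have : ¬(q.1.toNat = I ∧ q.2.toNat = J) := by
          intro ⟨hh, _⟩; exact g5 (by omega)
        rw [if_neg this]
      rw [hcongr]
      rw [pvSet2_mkTab hI hJ, pvSet2_mkTab hI hJ]
      refine pvMkTab_congr (fun k hk l hl => ?_)
      by_cases hkl : k = I ∧ l = J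
      · rw [if_pos hkl, if_pos hkl]
      · rw [if_neg hkl, if_neg hkl, if_neg hkl]
    · rw [if_neg hc, if_neg hc]
      exact ih (fun q hq hcq => hL q (List.mem_cons_of_mem _ hq) hcq) g


-- entry function of the table during A's inc loops: rows < i done, row i done up to column j
def gCellA (a b : List Int) (i j : Nat) : Nat → Nat → Int := fun k l =>
  if (k < i ∨ (k = i ∧ l < j)) ∧ a.getD k 0 = b.getD l 0 then pvT a b k l else 0

-- generic flattening of A's contains-guarded double scan
theorem pvInnerFlat {T : Type} (a b : List Int) (ks : List Int) (step : T → Int → Int → T) (init : T) :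
    ks.foldl (fun t k =>
      if (pvBmap b).contains (PySem.List.pyGetD a k 0) then
        ((pvBmap b).getD (PySem.List.pyGetD a k 0) []).foldl (fun t l => step t k l) t
      else t) init
    = (ks.flatMap (fun k => ((pvBmap b).getD (PySem.List.pyGetD a k 0) []).map (fun l => (k, l)))).foldl
        (fun t p => step t p.1 p.2) init := by
  rw [List.foldl_flatMap]
  refine PySem.List.foldl_congr_mem _ _ _ _ (fun t k _ => ?_)
  rw [List.foldl_map]
  by_cases hc : (pvBmap b).contains (PySem.List.pyGetD a k 0)
  · rw [if_pos hc]
  · rw [if_neg (by simp [hc]), PySem.Dict.getD_of_not_contains _ _ (by simp [hc])]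
    rfl

-- one cell step of A's inc loop
theorem pvCellA (a b : List Int) (i j : Nat) (hi : i < a.length) (hj : j < b.length) :
    (if PySem.List.pyGetD a (i : Int) 0 = PySem.List.pyGetD b (j : Int) 0 then
      (PySem.List.pyRange 0 (i : Int) 1).foldl (fun t k =>
        if (pvBmap b).contains (PySem.List.pyGetD a k 0) then
          ((pvBmap b).getD (PySem.List.pyGetD a k 0) []).foldl (fun t l =>
            if l < (j : Int) ∧ PySem.List.pyGetD a k 0 < PySem.List.pyGetD a (i : Int) 0 then
              pvSet2 t (i : Int) (j : Int) (max (pvGet2 t (i : Int) (j : Int)) (pvGet2 t k l + 1))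
            else t) t
        else t) (pvSet2 (pvMkTab a.length b.length (gCellA a b i j)) (i : Int) (j : Int) 1)
    else pvMkTab a.length b.length (gCellA a b i j))
    = pvMkTab a.length b.length (gCellA a b i (j + 1)) := by
  simp only [PySem.List.pyGetD_natCast]
  by_cases hm : a.getD i 0 = b.getD j 0
  · rw [if_pos hm, pvSet2_mkTab hi hj, pvInnerFlat, pvSet2_loop _ _ hi hj ?hL]
    case hL =>
      rintro p hp hc
      obtain ⟨x, hx, hpm⟩ := List.mem_flatMap.mp hp
      obtain ⟨y, hy, rfl⟩ := List.mem_map.mp hpm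
      obtain ⟨hx0, hxi⟩ := PySem.List.mem_pyRange_one.mp hx
      obtain ⟨l0, hl0, rfl, hb⟩ := mem_pvBmap.mp hy
      refine ⟨hx0, by push_cast; omega, by positivity, by push_cast; omega, by omega⟩
    set g0 : Nat → Nat → Int := fun k l => if k = i ∧ l = j then 1 else gCellA a b i j k l with hg0
    have hinit : pvGet2 (pvMkTab a.length b.length g0) (i : Int) (j : Int) = 1 := by
      rw [pvGet2_mkTab hi hj, hg0]
      simp
    have hread : ∀ (k l0 : Nat), k < i → l0 < b.length → b.getD l0 0 = a.getD k 0 →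
        pvGet2 (pvMkTab a.length b.length g0) (k : Int) (l0 : Int) = pvT a b k l0 := by
      intro k l0 hk hl0 hb
      rw [pvGet2_mkTab (by omega) hl0, hg0]
      simp only
      rw [if_neg (by omega), gCellA, if_pos ⟨Or.inl hk, hb.symm⟩]
    have hV : pvCmax
        ((PySem.List.pyRange 0 (i : Int) 1).flatMap
          (fun k => ((pvBmap b).getD (PySem.List.pyGetD a k 0) []).map (fun l => (k, l))))
        (fun p => p.2 < (j : Int) ∧ PySem.List.pyGetD a p.1 0 < a.getD i 0)
        (fun p => pvGet2 (pvMkTab a.length b.length g0) p.1 p.2 + 1)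
        (pvGet2 (pvMkTab a.length b.length g0) (i : Int) (j : Int)) = pvT a b i j := by
      apply le_antisymm
      · refine pvCmax_le (by rw [hinit]; exact one_le_pvT hj) ?_
        rintro p hp hc
        obtain ⟨x, hx, hpm⟩ := List.mem_flatMap.mp hp
        obtain ⟨y, hy, rfl⟩ := List.mem_map.mp hpm
        obtain ⟨hx0, hxi⟩ := PySem.List.mem_pyRange_one.mp hx
        obtain ⟨l0, hl0, rfl, hb⟩ := mem_pvBmap.mp hy
        obtain ⟨k, rfl⟩ : ∃ k : Nat, x = (k : Int) := ⟨x.toNat, by omega⟩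
        rw [PySem.List.pyGetD_natCast] at hb
        have hki : k < i := by exact_mod_cast hxi
        have hcj : (l0 : Int) < (j : Int) := hc.1
        have hclt : PySem.List.pyGetD a (k : Int) 0 < a.getD i 0 := hc.2
        rw [PySem.List.pyGetD_natCast] at hclt
        have hl0j : l0 < j := by exact_mod_cast hcj
        simp only
        rw [hread k l0 hki hl0 hb, pvT_eq hj]
        have := le_pvS (a := a) (b := b) hki hl0j ⟨hb, hclt⟩
        omega
      · rw [pvT_eq hj]
        rcases pvS_cases a b i j with h0 | ⟨k, l0, hk, hl0, ⟨hb, hlt⟩, heq⟩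
        · rw [h0, hinit]
          have := le_pvCmax_init
            ((PySem.List.pyRange 0 (i : Int) 1).flatMap
              (fun k => ((pvBmap b).getD (PySem.List.pyGetD a k 0) []).map (fun l => (k, l))))
            (fun p => p.2 < (j : Int) ∧ PySem.List.pyGetD a p.1 0 < a.getD i 0)
            (fun p => pvGet2 (pvMkTab a.length b.length g0) p.1 p.2 + 1) 1
          omega
        · have hmem : ((k : Int), (l0 : Int)) ∈
              ((PySem.List.pyRange 0 (i : Int) 1).flatMap
                (fun k => ((pvBmap b).getD (PySem.List.pyGetD a k 0) []).map (fun l => (k, l)))) := by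
            refine List.mem_flatMap.mpr ⟨(k : Int), PySem.List.mem_pyRange_one.mpr
              ⟨by positivity, by exact_mod_cast hk⟩, List.mem_map.mpr ⟨(l0 : Int), ?_, rfl⟩⟩
            refine mem_pvBmap.mpr ⟨l0, by omega, rfl, ?_⟩
            rw [PySem.List.pyGetD_natCast]
            exact hb
          have hc : ((k : Int), (l0 : Int)).2 < (j : Int) ∧
              PySem.List.pyGetD a ((k : Int), (l0 : Int)).1 0 < a.getD i 0 := by
            constructor
            · show (l0 : Int) < (j : Int)
              exact_mod_cast hl0
            · show PySem.List.pyGetD a (k : Int) 0 < a.getD i 0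
              rw [PySem.List.pyGetD_natCast]
              exact hlt
          have hle := le_pvCmax_of_mem
            (c := fun p => p.2 < (j : Int) ∧ PySem.List.pyGetD a p.1 0 < a.getD i 0)
            (f := fun p => pvGet2 (pvMkTab a.length b.length g0) p.1 p.2 + 1)
            (init := pvGet2 (pvMkTab a.length b.length g0) (i : Int) (j : Int)) hmem hc
          simp only at hle
          rw [hread k l0 hk (by omega) hb] at hle
          omega
    rw [hV, pvSet2_mkTab hi hj]
    refine pvMkTab_congr (fun k hkm l hln => ?_)
    by_cases hkl : k = i ∧ l = j
    · obtain ⟨rfl, rfl⟩ := hkl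
      rw [if_pos ⟨rfl, rfl⟩, gCellA, if_pos ⟨Or.inr ⟨rfl, by omega⟩, hm⟩]
    · rw [if_neg hkl, hg0]
      simp only
      rw [if_neg hkl, gCellA, gCellA]
      have hiff : ((k < i ∨ (k = i ∧ l < j)) ∧ a.getD k 0 = b.getD l 0) ↔
          ((k < i ∨ (k = i ∧ l < j + 1)) ∧ a.getD k 0 = b.getD l 0) := by
        constructor
        · rintro ⟨h1, h2⟩
          exact ⟨by omega, h2⟩
        · rintro ⟨h1, h2⟩
          refine ⟨?_, h2⟩
          rcases h1 with h1 | ⟨rfl, hl1⟩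
          · exact Or.inl h1
          · have : l ≠ j := fun hh => hkl ⟨rfl, hh⟩
            exact Or.inr ⟨rfl, by omega⟩
      exact if_congr hiff rfl rfl
  · rw [if_neg hm]
    refine pvMkTab_congr (fun k hkm l hln => ?_)
    unfold gCellA
    have hiff : ((k < i ∨ (k = i ∧ l < j)) ∧ a.getD k 0 = b.getD l 0) ↔
        ((k < i ∨ (k = i ∧ l < j + 1)) ∧ a.getD k 0 = b.getD l 0) := by
      constructor
      · rintro ⟨h1, h2⟩
        exact ⟨by omega, h2⟩
      · rintro ⟨h1, h2⟩
        refine ⟨?_, h2⟩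
        rcases h1 with h1 | ⟨rfl, hl1⟩
        · exact Or.inl h1
        · by_cases hlj : l = j
          · subst hlj
            exact absurd h2 hm
          · exact Or.inr ⟨rfl, by omega⟩
    exact if_congr hiff rfl rfl


-- one full row of A's inc loop
theorem pvRowA (a b : List Int) (i : Nat) (hi : i < a.length) :
    ∀ j, j ≤ b.length →
    (List.range j).foldl
      (fun x y_1 =>
        if PySem.List.pyGetD a ((i : Nat) : Int) 0 = PySem.List.pyGetD b (((y_1 : Nat)) : Int) 0 then
          List.foldl
            (fun t k =>
              if (pvBmap b).contains (PySem.List.pyGetD a k 0) = true then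
                List.foldl
                  (fun t l =>
                    if l < (((y_1 : Nat)) : Int) ∧ PySem.List.pyGetD a k 0 < PySem.List.pyGetD a ((i : Nat) : Int) 0 then
                      pvSet2 t ((i : Nat) : Int) (((y_1 : Nat)) : Int)
                        (max (pvGet2 t ((i : Nat) : Int) (((y_1 : Nat)) : Int)) (pvGet2 t k l + 1))
                    else t)
                  t ((pvBmap b).getD (PySem.List.pyGetD a k 0) [])
              else t)
            (pvSet2 x ((i : Nat) : Int) (((y_1 : Nat)) : Int) 1) (PySem.List.pyRange 0 ((i : Nat) : Int) 1)
        else x)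
      (pvMkTab a.length b.length (gCellA a b i 0))
    = pvMkTab a.length b.length (gCellA a b i j) := by
  intro j hj
  induction j with
  | zero => simp
  | succ j ih =>
    rw [List.range_succ, List.foldl_append, ih (by omega)]
    simp only [List.foldl_cons, List.foldl_nil]
    exact pvCellA a b i j hi (by omega)

-- finished row i means rows < i+1 finished
theorem gCellA_row_done (a b : List Int) (i : Nat) :
    pvMkTab a.length b.length (gCellA a b i b.length)
      = pvMkTab a.length b.length (gCellA a b (i + 1) 0) := by
  refine pvMkTab_congr (fun k hk l hl => ?_)
  unfold gCellA
  refine if_congr ?_ rfl rfl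
  constructor
  · rintro ⟨h1, h2⟩
    exact ⟨by omega, h2⟩
  · rintro ⟨h1, h2⟩
    exact ⟨by omega, h2⟩

-- A's inc table equals the reference table
theorem pvIncA_eq (a b : List Int) :
    pvIncA a b = pvMkTab a.length b.length (gCellA a b a.length 0) := by
  simp only [pvIncA]
  rw [pvZeroTab, PySem.List.pyRange_zero_nat a.length, PySem.List.pyRange_zero_nat b.length]
  simp only [List.foldl_map]
  suffices h : ∀ i, i ≤ a.length →
      (List.range i).foldl
        (fun x y =>
          List.foldl
            (fun x y_1 =>
            if PySem.List.pyGetD a ((y : Nat) : Int) 0 = PySem.List.pyGetD b (((y_1 : Nat)) : Int) 0 then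
              List.foldl
                (fun t k =>
                  if (pvBmap b).contains (PySem.List.pyGetD a k 0) = true then
                    List.foldl
                      (fun t l =>
                        if l < (((y_1 : Nat)) : Int) ∧ PySem.List.pyGetD a k 0 < PySem.List.pyGetD a ((y : Nat) : Int) 0 then
                          pvSet2 t ((y : Nat) : Int) (((y_1 : Nat)) : Int)
                            (max (pvGet2 t ((y : Nat) : Int) (((y_1 : Nat)) : Int)) (pvGet2 t k l + 1))
                        else t)
                      t ((pvBmap b).getD (PySem.List.pyGetD a k 0) [])
                  else t)
                (pvSet2 x ((y : Nat) : Int) (((y_1 : Nat)) : Int) 1) (PySem.List.pyRange 0 ((y : Nat) : Int) 1)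
            else x)
            x (List.range b.length))
        (pvMkTab a.length b.length fun _ _ => 0) = pvMkTab a.length b.length (gCellA a b i 0) by
    exact h a.length le_rfl
  intro i hi
  induction i with
  | zero =>
    simp only [List.range_zero, List.foldl_nil]
    refine pvMkTab_congr (fun k hk l hl => ?_)
    unfold gCellA
    rw [if_neg (by omega)]
  | succ i ih =>
    rw [List.range_succ, List.foldl_append, ih (by omega)]
    simp only [List.foldl_cons, List.foldl_nil]
    rw [← gCellA_row_done]
    exact pvRowA a b i (by omega) b.length le_rfl


-- entry function of the table during A's dec loops: rows > i done, row i done from column j up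
def gCellD (a b : List Int) (i j : Nat) : Nat → Nat → Int := fun k l =>
  if (i < k ∨ (k = i ∧ j ≤ l)) ∧ a.getD k 0 = b.getD l 0 then
    pvT a.reverse b.reverse (a.length - 1 - k) (b.length - 1 - l)
  else 0

-- one cell step of A's dec loop
theorem pvCellD (a b : List Int) (i j : Nat) (hi : i < a.length) (hj : j < b.length) :
    (if PySem.List.pyGetD a (i : Int) 0 = PySem.List.pyGetD b (j : Int) 0 then
      (PySem.List.pyRange ((i : Int) + 1) (a.length : Int) 1).foldl (fun t k =>
        if (pvBmap b).contains (PySem.List.pyGetD a k 0) = true then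
          ((pvBmap b).getD (PySem.List.pyGetD a k 0) []).foldl (fun t l =>
            if (j : Int) < l ∧ PySem.List.pyGetD a k 0 < PySem.List.pyGetD a (i : Int) 0 then
              pvSet2 t (i : Int) (j : Int) (max (pvGet2 t (i : Int) (j : Int)) (pvGet2 t k l + 1))
            else t) t
        else t) (pvSet2 (pvMkTab a.length b.length (gCellD a b i (j + 1))) (i : Int) (j : Int) 1)
    else pvMkTab a.length b.length (gCellD a b i (j + 1)))
    = pvMkTab a.length b.length (gCellD a b i j) := by
  have hrj : b.length - 1 - j < b.reverse.length := by simp; omega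
  have hai : a.reverse.getD (a.length - 1 - i) 0 = a.getD i 0 := getD_reverse hi
  have hbj : b.reverse.getD (b.length - 1 - j) 0 = b.getD j 0 := getD_reverse hj
  simp only [PySem.List.pyGetD_natCast]
  by_cases hm : a.getD i 0 = b.getD j 0
  · rw [if_pos hm, pvSet2_mkTab hi hj, pvInnerFlat, pvSet2_loop _ _ hi hj ?hL]
    case hL =>
      rintro p hp hc
      obtain ⟨x, hx, hpm⟩ := List.mem_flatMap.mp hp
      obtain ⟨y, hy, rfl⟩ := List.mem_map.mp hpm
      obtain ⟨hx0, hxi⟩ := PySem.List.mem_pyRange_one.mp hx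
      obtain ⟨l0, hl0, rfl, hb⟩ := mem_pvBmap.mp hy
      refine ⟨by omega, hxi, by positivity, ?_, by omega⟩
      show ((l0 : Nat) : Int) < ((b.length : Nat) : Int)
      exact_mod_cast hl0
    set g0 : Nat → Nat → Int := fun k l => if k = i ∧ l = j then 1 else gCellD a b i (j + 1) k l with hg0
    have hinit : pvGet2 (pvMkTab a.length b.length g0) (i : Int) (j : Int) = 1 := by
      rw [pvGet2_mkTab hi hj, hg0]
      simp
    have hread : ∀ (k l0 : Nat), i < k → k < a.length → l0 < b.length → b.getD l0 0 = a.getD k 0 →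
        pvGet2 (pvMkTab a.length b.length g0) (k : Int) (l0 : Int)
          = pvT a.reverse b.reverse (a.length - 1 - k) (b.length - 1 - l0) := by
      intro k l0 hik hk hl0 hb
      rw [pvGet2_mkTab hk hl0, hg0]
      simp only
      rw [if_neg (by omega), gCellD, if_pos ⟨Or.inl hik, hb.symm⟩]
    have hV : pvCmax
        ((PySem.List.pyRange ((i : Int) + 1) (a.length : Int) 1).flatMap
          (fun k => ((pvBmap b).getD (PySem.List.pyGetD a k 0) []).map (fun l => (k, l))))
        (fun p => (j : Int) < p.2 ∧ PySem.List.pyGetD a p.1 0 < a.getD i 0)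
        (fun p => pvGet2 (pvMkTab a.length b.length g0) p.1 p.2 + 1)
        (pvGet2 (pvMkTab a.length b.length g0) (i : Int) (j : Int))
        = pvT a.reverse b.reverse (a.length - 1 - i) (b.length - 1 - j) := by
      apply le_antisymm
      · refine pvCmax_le (by rw [hinit]; exact one_le_pvT hrj) ?_
        rintro p hp hc
        obtain ⟨x, hx, hpm⟩ := List.mem_flatMap.mp hp
        obtain ⟨y, hy, rfl⟩ := List.mem_map.mp hpm
        obtain ⟨hx0, hxm⟩ := PySem.List.mem_pyRange_one.mp hx
        obtain ⟨l0, hl0, rfl, hb⟩ := mem_pvBmap.mp hy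
        obtain ⟨k, rfl⟩ : ∃ k : Nat, x = (k : Int) := ⟨x.toNat, by omega⟩
        rw [PySem.List.pyGetD_natCast] at hb
        have hik : i < k := by exact_mod_cast by omega
        have hkm : k < a.length := by exact_mod_cast hxm
        have hcj : (j : Int) < (l0 : Int) := hc.1
        have hclt : PySem.List.pyGetD a (k : Int) 0 < a.getD i 0 := hc.2
        rw [PySem.List.pyGetD_natCast] at hclt
        have hjl0 : j < l0 := by exact_mod_cast hcj
        simp only
        rw [hread k l0 hik hkm hl0 hb, pvT_eq hrj]
        have hcond : b.reverse.getD (b.length - 1 - l0) 0 = a.reverse.getD (a.length - 1 - k) 0 ∧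
            a.reverse.getD (a.length - 1 - k) 0 < a.reverse.getD (a.length - 1 - i) 0 := by
          rw [getD_reverse hl0, getD_reverse hkm, hai]
          exact ⟨hb, hclt⟩
        have := le_pvS (a := a.reverse) (b := b.reverse)
          (i := a.length - 1 - i) (j := b.length - 1 - j)
          (k := a.length - 1 - k) (l := b.length - 1 - l0)
          (by omega) (by omega) hcond
        omega
      · rw [pvT_eq hrj]
        rcases pvS_cases a.reverse b.reverse (a.length - 1 - i) (b.length - 1 - j) with
          h0 | ⟨k', l', hk', hl', ⟨hb', hlt'⟩, heq⟩
        · rw [h0, hinit]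
          have := le_pvCmax_init
            ((PySem.List.pyRange ((i : Int) + 1) (a.length : Int) 1).flatMap
              (fun k => ((pvBmap b).getD (PySem.List.pyGetD a k 0) []).map (fun l => (k, l))))
            (fun p => (j : Int) < p.2 ∧ PySem.List.pyGetD a p.1 0 < a.getD i 0)
            (fun p => pvGet2 (pvMkTab a.length b.length g0) p.1 p.2 + 1) 1
          omega
        · set k := a.length - 1 - k' with hkdef
          set l0 := b.length - 1 - l' with hl0def
          have hik : i < k := by omega
          have hkm : k < a.length := by omega
          have hjl0 : j < l0 := by omega
          have hl0n : l0 < b.length := by omega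
          have hk'e : a.length - 1 - k = k' := by omega
          have hl'e : b.length - 1 - l0 = l' := by omega
          have e1 : b.reverse.getD l' 0 = b.getD l0 0 := by
            rw [← hl'e]; exact getD_reverse hl0n
          have e2 : a.reverse.getD k' 0 = a.getD k 0 := by
            rw [← hk'e]; exact getD_reverse hkm
          have hb0 : b.getD l0 0 = a.getD k 0 := by rw [← e1, ← e2]; exact hb'
          have hlt0 : a.getD k 0 < a.getD i 0 := by rw [← e2, ← hai]; exact hlt'
          have hmem : ((k : Int), (l0 : Int)) ∈
              ((PySem.List.pyRange ((i : Int) + 1) (a.length : Int) 1).flatMap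
                (fun k => ((pvBmap b).getD (PySem.List.pyGetD a k 0) []).map (fun l => (k, l)))) := by
            refine List.mem_flatMap.mpr ⟨(k : Int), PySem.List.mem_pyRange_one.mpr
              ⟨by omega, by exact_mod_cast hkm⟩, List.mem_map.mpr ⟨(l0 : Int), ?_, rfl⟩⟩
            refine mem_pvBmap.mpr ⟨l0, hl0n, rfl, ?_⟩
            rw [PySem.List.pyGetD_natCast]
            exact hb0
          have hc : ((k : Int), (l0 : Int)).2 > (j : Int) ∧
              PySem.List.pyGetD a ((k : Int), (l0 : Int)).1 0 < a.getD i 0 := by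
            constructor
            · show (j : Int) < (l0 : Int)
              exact_mod_cast hjl0
            · show PySem.List.pyGetD a (k : Int) 0 < a.getD i 0
              rw [PySem.List.pyGetD_natCast]
              exact hlt0
          have hle := le_pvCmax_of_mem
            (c := fun p => (j : Int) < p.2 ∧ PySem.List.pyGetD a p.1 0 < a.getD i 0)
            (f := fun p => pvGet2 (pvMkTab a.length b.length g0) p.1 p.2 + 1)
            (init := pvGet2 (pvMkTab a.length b.length g0) (i : Int) (j : Int)) hmem hc
          simp only at hle
          rw [hread k l0 hik hkm hl0n hb0, hk'e, hl'e] at hle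
          omega
    rw [hV, pvSet2_mkTab hi hj]
    refine pvMkTab_congr (fun k hkm l hln => ?_)
    by_cases hkl : k = i ∧ l = j
    · obtain ⟨rfl, rfl⟩ := hkl
      rw [if_pos ⟨rfl, rfl⟩, gCellD, if_pos ⟨Or.inr ⟨rfl, le_rfl⟩, hm⟩]
    · rw [if_neg hkl, hg0]
      simp only
      rw [if_neg hkl, gCellD, gCellD]
      refine if_congr ?_ rfl rfl
      constructor
      · rintro ⟨h1, h2⟩
        refine ⟨?_, h2⟩
        rcases h1 with h1 | ⟨rfl, hl1⟩
        · exact Or.inl h1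
        · have : l ≠ j := fun hh => hkl ⟨rfl, hh⟩
          exact Or.inr ⟨rfl, by omega⟩
      · rintro ⟨h1, h2⟩
        exact ⟨by omega, h2⟩
  · rw [if_neg hm]
    refine pvMkTab_congr (fun k hkm l hln => ?_)
    unfold gCellD
    refine if_congr ?_ rfl rfl
    constructor
    · rintro ⟨h1, h2⟩
      exact ⟨by omega, h2⟩
    · rintro ⟨h1, h2⟩
      refine ⟨?_, h2⟩
      rcases h1 with h1 | ⟨rfl, hl1⟩
      · exact Or.inl h1
      · by_cases hlj : l = j
        · subst hlj
          exact absurd h2 hm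
        · exact Or.inr ⟨rfl, by omega⟩


-- one full row of A's dec loop (columns processed right to left)
theorem pvRowD (a b : List Int) (i : Nat) (hi : i < a.length) :
    ∀ t, t ≤ b.length →
    (((List.range b.length).drop (b.length - t)).reverse).foldl
      (fun x y_1 =>
        if PySem.List.pyGetD a ((i : Nat) : Int) 0 = PySem.List.pyGetD b (((y_1 : Nat)) : Int) 0 then
          List.foldl
            (fun t k =>
              if (pvBmap b).contains (PySem.List.pyGetD a k 0) = true then
                List.foldl
                  (fun t l =>
                    if (((y_1 : Nat)) : Int) < l ∧ PySem.List.pyGetD a k 0 < PySem.List.pyGetD a ((i : Nat) : Int) 0 then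
                      pvSet2 t ((i : Nat) : Int) (((y_1 : Nat)) : Int)
                        (max (pvGet2 t ((i : Nat) : Int) (((y_1 : Nat)) : Int)) (pvGet2 t k l + 1))
                    else t)
                  t ((pvBmap b).getD (PySem.List.pyGetD a k 0) [])
              else t)
            (pvSet2 x ((i : Nat) : Int) (((y_1 : Nat)) : Int) 1)
            (PySem.List.pyRange (((i : Nat) : Int) + 1) (a.length : Int) 1)
        else x)
      (pvMkTab a.length b.length (gCellD a b i b.length))
    = pvMkTab a.length b.length (gCellD a b i (b.length - t)) := by
  intro t ht
  induction t with
  | zero =>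
    rw [Nat.sub_zero, show List.drop b.length (List.range b.length) = [] from by simp]
    simp
  | succ t ih =>
    have hid : b.length - (t + 1) < (List.range b.length).length := by simp; omega
    rw [List.drop_eq_getElem_cons hid, List.getElem_range,
        show b.length - (t + 1) + 1 = b.length - t from by omega,
        List.reverse_cons, List.foldl_append, ih (by omega)]
    simp only [List.foldl_cons, List.foldl_nil]
    rw [show b.length - t = (b.length - (t + 1)) + 1 from by omega]
    exact pvCellD a b i (b.length - (t + 1)) hi (by omega)

-- a freshly started row i of the dec loop sees exactly the rows > i
theorem gCellD_row_start (a b : List Int) (i : Nat) :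
    pvMkTab a.length b.length (gCellD a b (i + 1) 0)
      = pvMkTab a.length b.length (gCellD a b i b.length) := by
  refine pvMkTab_congr (fun k hk l hl => ?_)
  unfold gCellD
  refine if_congr ?_ rfl rfl
  constructor
  · rintro ⟨h1, h2⟩
    exact ⟨by omega, h2⟩
  · rintro ⟨h1, h2⟩
    exact ⟨by omega, h2⟩

-- A's dec table equals the mirrored reference table
theorem pvDecA_eq (a b : List Int) :
    pvDecA a b = pvMkTab a.length b.length (gCellD a b 0 0) := by
  simp only [pvDecA]
  rw [pvZeroTab, PySem.List.pyRange_zero_nat a.length, PySem.List.pyRange_zero_nat b.length,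
      ← List.map_reverse, ← List.map_reverse]
  simp only [List.foldl_map]
  suffices h : ∀ t, t ≤ a.length →
      ((((List.range a.length).drop (a.length - t)).reverse).foldl
        (fun x y =>
          List.foldl
            (fun x y_1 =>
            if PySem.List.pyGetD a ((y : Nat) : Int) 0 = PySem.List.pyGetD b (((y_1 : Nat)) : Int) 0 then
              List.foldl
                (fun t k =>
                  if (pvBmap b).contains (PySem.List.pyGetD a k 0) = true then
                    List.foldl
                      (fun t l =>
                        if (((y_1 : Nat)) : Int) < l ∧ PySem.List.pyGetD a k 0 < PySem.List.pyGetD a ((y : Nat) : Int) 0 then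
                          pvSet2 t ((y : Nat) : Int) (((y_1 : Nat)) : Int)
                            (max (pvGet2 t ((y : Nat) : Int) (((y_1 : Nat)) : Int)) (pvGet2 t k l + 1))
                        else t)
                      t ((pvBmap b).getD (PySem.List.pyGetD a k 0) [])
                  else t)
                (pvSet2 x ((y : Nat) : Int) (((y_1 : Nat)) : Int) 1)
                (PySem.List.pyRange (((y : Nat) : Int) + 1) (a.length : Int) 1)
            else x)
            x (List.range b.length).reverse)
        (pvMkTab a.length b.length fun _ _ => 0))
      = pvMkTab a.length b.length (gCellD a b (a.length - t) 0) by
    have h2 := h a.length le_rfl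
    rw [Nat.sub_self, List.drop_zero] at h2
    exact h2
  intro t ht
  induction t with
  | zero =>
    rw [Nat.sub_zero, show List.drop a.length (List.range a.length) = [] from by simp]
    simp only [List.reverse_nil, List.foldl_nil]
    refine pvMkTab_congr (fun k hk l hl => ?_)
    unfold gCellD
    rw [if_neg (by omega)]
  | succ t ih =>
    have hid : a.length - (t + 1) < (List.range a.length).length := by simp; omega
    rw [List.drop_eq_getElem_cons hid, List.getElem_range,
        show a.length - (t + 1) + 1 = a.length - t from by omega,
        List.reverse_cons, List.foldl_append, ih (by omega)]
    simp only [List.foldl_cons, List.foldl_nil]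
    rw [show a.length - t = (a.length - (t + 1)) + 1 from by omega, gCellD_row_start]
    have hr := pvRowD a b (a.length - (t + 1)) (by omega) b.length le_rfl
    rw [Nat.sub_self, List.drop_zero] at hr
    exact hr


-- B's rolling state: best chain value per column, and the running row maximum
def pvDpS (a b : List Int) (i l : Nat) : Int :=
  pvCmax (List.range i) (fun k => a.getD k 0 = b.getD l 0) (fun k => pvT a b k l) 0

def pvCurS (a b : List Int) (i j : Nat) : Int :=
  pvCmax (List.range j) (fun l => b.getD l 0 < a.getD i 0) (fun l => pvDpS a b i l) 0

def pvDpMid (a b : List Int) (i j : Nat) : List Int :=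
  (List.range b.length).map (fun l => if l < j then pvDpS a b (i + 1) l else pvDpS a b i l)

theorem pvDpS_succ (a b : List Int) (i l : Nat) :
    pvDpS a b (i + 1) l
      = if a.getD i 0 = b.getD l 0 then max (pvDpS a b i l) (pvT a b i l) else pvDpS a b i l := by
  unfold pvDpS
  rw [List.range_succ, pvCmax_append_singleton]

theorem pvCurS_succ (a b : List Int) (i j : Nat) :
    pvCurS a b i (j + 1)
      = if b.getD j 0 < a.getD i 0 then max (pvCurS a b i j) (pvDpS a b i j) else pvCurS a b i j := by
  unfold pvCurS
  rw [List.range_succ, pvCmax_append_singleton]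

-- the crux: at a match, B's cur + 1 is exactly the reference value
theorem pvCur_eq_T {a b : List Int} {i j : Nat} (hj : j < b.length)
    (_hm : a.getD i 0 = b.getD j 0) : pvCurS a b i j + 1 = pvT a b i j := by
  have h1 : pvCurS a b i j ≤ pvS a b i j := by
    refine pvCmax_le (pvS_nonneg a b i j) (fun l hl hc => ?_)
    refine pvCmax_le (pvS_nonneg a b i j) (fun k hk hck => ?_)
    exact le_pvS (List.mem_range.mp hk) (List.mem_range.mp hl) ⟨hck.symm, by rw [hck]; exact hc⟩
  have h2 : pvT a b i j ≤ pvCurS a b i j + 1 := by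
    rw [pvT_eq hj]
    rcases pvS_cases a b i j with h0 | ⟨k, l, hk, hl, ⟨hb, hlt⟩, heq⟩
    · have := le_pvCmax_init (List.range j) (fun l => b.getD l 0 < a.getD i 0)
        (fun l => pvDpS a b i l) 0
      unfold pvCurS
      omega
    · have ha : pvT a b k l ≤ pvDpS a b i l :=
        le_pvCmax_of_mem (c := fun k => a.getD k 0 = b.getD l 0) (f := fun k => pvT a b k l)
          (init := 0) (List.mem_range.mpr hk) hb.symm
      have hb2 : pvDpS a b i l ≤ pvCurS a b i j :=
        le_pvCmax_of_mem (c := fun l => b.getD l 0 < a.getD i 0) (f := fun l => pvDpS a b i l)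
          (init := 0) (List.mem_range.mpr hl) (by show b.getD l 0 < a.getD i 0; rw [hb]; exact hlt)
      omega
  rw [pvT_eq hj] at h2 ⊢
  omega

-- skipping a non-matching cell leaves the intended inc table unchanged
theorem gCellA_col_skip {a b : List Int} {i j : Nat} (hm : ¬ a.getD i 0 = b.getD j 0) :
    pvMkTab a.length b.length (gCellA a b i j) = pvMkTab a.length b.length (gCellA a b i (j + 1)) := by
  refine pvMkTab_congr (fun k hkm l hln => ?_)
  unfold gCellA
  refine if_congr ?_ rfl rfl
  constructor
  · rintro ⟨h1, h2⟩
    exact ⟨by omega, h2⟩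
  · rintro ⟨h1, h2⟩
    refine ⟨?_, h2⟩
    rcases h1 with h1 | ⟨rfl, hl1⟩
    · exact Or.inl h1
    · by_cases hlj : l = j
      · subst hlj
        exact absurd h2 hm
      · exact Or.inr ⟨rfl, by omega⟩

-- writing the reference value into a matching cell finishes it
theorem gCellA_set {a b : List Int} {i j : Nat} (hi : i < a.length) (hj : j < b.length)
    (hm : a.getD i 0 = b.getD j 0) :
    pvSet2 (pvMkTab a.length b.length (gCellA a b i j)) (i : Int) (j : Int) (pvT a b i j)
      = pvMkTab a.length b.length (gCellA a b i (j + 1)) := by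
  rw [pvSet2_mkTab hi hj]
  refine pvMkTab_congr (fun k hkm l hln => ?_)
  by_cases hkl : k = i ∧ l = j
  · obtain ⟨rfl, rfl⟩ := hkl
    rw [if_pos ⟨rfl, rfl⟩, gCellA, if_pos ⟨Or.inr ⟨rfl, by omega⟩, hm⟩]
  · rw [if_neg hkl, gCellA, gCellA]
    refine if_congr ?_ rfl rfl
    constructor
    · rintro ⟨h1, h2⟩
      exact ⟨by omega, h2⟩
    · rintro ⟨h1, h2⟩
      refine ⟨?_, h2⟩
      rcases h1 with h1 | ⟨rfl, hl1⟩
      · exact Or.inl h1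
      · have : l ≠ j := fun hh => hkl ⟨rfl, hh⟩
        exact Or.inr ⟨rfl, by omega⟩

theorem pvDpMid_read {a b : List Int} {i j : Nat} (hj : j < b.length) :
    PySem.List.pyGetD (pvDpMid a b i j) (j : Int) 0 = pvDpS a b i j := by
  rw [PySem.List.pyGetD_natCast]
  unfold pvDpMid
  rw [PySem.List.getD_map_range _ _ _ _ hj, if_neg (by omega)]

theorem pvDpMid_write {a b : List Int} {i j : Nat} (_hj : j < b.length) (v : Int) :
    PySem.List.pySetD (pvDpMid a b i j) (j : Int) v
      = (List.range b.length).map (fun l =>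
          if l = j then v else if l < j then pvDpS a b (i + 1) l else pvDpS a b i l) := by
  rw [PySem.List.pySetD_natCast]
  unfold pvDpMid
  refine List.ext_getElem (by simp) (fun l hl1 hl2 => ?_)
  rw [List.getElem_set]
  simp only [List.getElem_map, List.getElem_range]
  by_cases hlj : j = l
  · subst hlj
    rw [if_pos rfl]
  · rw [if_neg hlj, if_neg (show ¬ l = j from fun hh => hlj hh.symm)]


-- one full row of B's table loop
theorem pvRowB (a b : List Int) (i : Nat) (hi : i < a.length) :
    ∀ j, j ≤ b.length →
    (List.range j).foldl
      (fun x y_1 =>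
        if PySem.List.pyGetD a (((i : Nat)) : Int) 0 = PySem.List.pyGetD b (((y_1 : Nat)) : Int) 0 then
          (pvSet2 x.1 (((i : Nat)) : Int) (((y_1 : Nat)) : Int) (x.2.2 + 1),
            if PySem.List.pyGetD x.2.1 (((y_1 : Nat)) : Int) 0 < x.2.2 + 1 then
              PySem.List.pySetD x.2.1 (((y_1 : Nat)) : Int) (x.2.2 + 1)
            else x.2.1,
            x.2.2)
        else
          if PySem.List.pyGetD b (((y_1 : Nat)) : Int) 0 < PySem.List.pyGetD a (((i : Nat)) : Int) 0 then
            (x.1, x.2.1,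
              if x.2.2 < PySem.List.pyGetD x.2.1 (((y_1 : Nat)) : Int) 0 then
                PySem.List.pyGetD x.2.1 (((y_1 : Nat)) : Int) 0
              else x.2.2)
          else x)
      (pvMkTab a.length b.length (gCellA a b i 0), pvDpMid a b i 0, 0)
    = (pvMkTab a.length b.length (gCellA a b i j), pvDpMid a b i j, pvCurS a b i j) := by
  intro j hj
  induction j with
  | zero =>
    simp [pvCurS, pvCmax]
  | succ j ih =>
    rw [List.range_succ, List.foldl_append, ih (by omega)]
    simp only [List.foldl_cons, List.foldl_nil]
    have hjn : j < b.length := by omega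
    by_cases hm : a.getD i 0 = b.getD j 0
    · rw [if_pos (by simpa [PySem.List.pyGetD_natCast] using hm)]
      have hcur : pvCurS a b i j + 1 = pvT a b i j := pvCur_eq_T hjn hm
      have hinc : pvSet2 (pvMkTab a.length b.length (gCellA a b i j)) ((i : Nat) : Int)
            ((j : Nat) : Int) (pvCurS a b i j + 1)
          = pvMkTab a.length b.length (gCellA a b i (j + 1)) := by
        rw [hcur]
        exact gCellA_set hi hjn hm
      have hdpread : PySem.List.pyGetD (pvDpMid a b i j) ((j : Nat) : Int) 0 = pvDpS a b i j :=
        pvDpMid_read hjn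
      have hdp : (if PySem.List.pyGetD (pvDpMid a b i j) ((j : Nat) : Int) 0 < pvCurS a b i j + 1 then
            PySem.List.pySetD (pvDpMid a b i j) ((j : Nat) : Int) (pvCurS a b i j + 1)
          else pvDpMid a b i j) = pvDpMid a b i (j + 1) := by
        rw [hdpread, hcur]
        by_cases hlt : pvDpS a b i j < pvT a b i j
        · rw [if_pos hlt, hcur.symm, hcur, pvDpMid_write hjn]
          unfold pvDpMid
          refine List.map_congr_left (fun l hl => ?_)
          by_cases hlj : l = j
          · subst hlj
            rw [if_pos rfl, if_pos (by omega), pvDpS_succ, if_pos hm, max_eq_right (by omega)]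
          · rw [if_neg hlj]
            refine if_congr (by omega) rfl rfl
        · rw [if_neg hlt]
          unfold pvDpMid
          refine List.map_congr_left (fun l hl => ?_)
          by_cases hlj : l = j
          · subst hlj
            rw [if_neg (by omega), if_pos (by omega), pvDpS_succ, if_pos hm, max_eq_left (by omega)]
          · refine if_congr (by omega) rfl rfl
      have hcur2 : pvCurS a b i (j + 1) = pvCurS a b i j := by
        rw [pvCurS_succ, if_neg (by rw [← hm]; exact lt_irrefl _)]
      rw [hdp, hinc, hcur2]
    · rw [if_neg (by simpa [PySem.List.pyGetD_natCast] using hm)]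
      have hinc : pvMkTab a.length b.length (gCellA a b i j)
          = pvMkTab a.length b.length (gCellA a b i (j + 1)) := gCellA_col_skip hm
      have hdp : pvDpMid a b i j = pvDpMid a b i (j + 1) := by
        unfold pvDpMid
        refine List.map_congr_left (fun l hl => ?_)
        by_cases hlj : l = j
        · subst hlj
          rw [if_neg (by omega), if_pos (by omega), pvDpS_succ, if_neg hm]
        · refine if_congr (by omega) rfl rfl
      by_cases hlt : b.getD j 0 < a.getD i 0
      · rw [if_pos (by simpa [PySem.List.pyGetD_natCast] using hlt)]
        have hcur2 : (if pvCurS a b i j < PySem.List.pyGetD (pvDpMid a b i j) ((j : Nat) : Int) 0 then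
              PySem.List.pyGetD (pvDpMid a b i j) ((j : Nat) : Int) 0
            else pvCurS a b i j) = pvCurS a b i (j + 1) := by
          rw [pvDpMid_read hjn, pvCurS_succ, if_pos hlt]
          by_cases hc : pvCurS a b i j < pvDpS a b i j
          · rw [if_pos hc, max_eq_right (by omega)]
          · rw [if_neg hc, max_eq_left (by omega)]
        rw [hcur2, ← hinc, ← hdp]
      · rw [if_neg (by simpa [PySem.List.pyGetD_natCast] using hlt)]
        have hcur2 : pvCurS a b i (j + 1) = pvCurS a b i j := by
          rw [pvCurS_succ, if_neg hlt]
        rw [hcur2, ← hinc, ← hdp]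

-- B's table equals the reference table
theorem pvTable_eq (a b : List Int) :
    pvTable a b = pvMkTab a.length b.length (gCellA a b a.length 0) := by
  simp only [pvTable]
  rw [pvZeroTab, PySem.List.pyRange_zero_nat a.length, PySem.List.pyRange_zero_nat b.length]
  simp only [List.foldl_map]
  suffices h : ∀ i, i ≤ a.length →
      (List.range i).foldl
        (fun x y =>
          ((List.foldl
              (fun x y_1 =>
              if PySem.List.pyGetD a (((y : Nat)) : Int) 0 = PySem.List.pyGetD b (((y_1 : Nat)) : Int) 0 then
                (pvSet2 x.1 (((y : Nat)) : Int) (((y_1 : Nat)) : Int) (x.2.2 + 1),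
                  if PySem.List.pyGetD x.2.1 (((y_1 : Nat)) : Int) 0 < x.2.2 + 1 then
                    PySem.List.pySetD x.2.1 (((y_1 : Nat)) : Int) (x.2.2 + 1)
                  else x.2.1,
                  x.2.2)
              else
                if PySem.List.pyGetD b (((y_1 : Nat)) : Int) 0 < PySem.List.pyGetD a (((y : Nat)) : Int) 0 then
                  (x.1, x.2.1,
                    if x.2.2 < PySem.List.pyGetD x.2.1 (((y_1 : Nat)) : Int) 0 then
                      PySem.List.pyGetD x.2.1 (((y_1 : Nat)) : Int) 0
                    else x.2.2)
                else x)
              (x.1, x.2, 0) (List.range b.length)).1,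
            (List.foldl
              (fun x y_1 =>
              if PySem.List.pyGetD a (((y : Nat)) : Int) 0 = PySem.List.pyGetD b (((y_1 : Nat)) : Int) 0 then
                (pvSet2 x.1 (((y : Nat)) : Int) (((y_1 : Nat)) : Int) (x.2.2 + 1),
                  if PySem.List.pyGetD x.2.1 (((y_1 : Nat)) : Int) 0 < x.2.2 + 1 then
                    PySem.List.pySetD x.2.1 (((y_1 : Nat)) : Int) (x.2.2 + 1)
                  else x.2.1,
                  x.2.2)
              else
                if PySem.List.pyGetD b (((y_1 : Nat)) : Int) 0 < PySem.List.pyGetD a (((y : Nat)) : Int) 0 then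
                  (x.1, x.2.1,
                    if x.2.2 < PySem.List.pyGetD x.2.1 (((y_1 : Nat)) : Int) 0 then
                      PySem.List.pyGetD x.2.1 (((y_1 : Nat)) : Int) 0
                    else x.2.2)
                else x)
              (x.1, x.2, 0) (List.range b.length)).2.1))
        (pvMkTab a.length b.length fun _ _ => 0, List.replicate b.length 0)
      = (pvMkTab a.length b.length (gCellA a b i 0), pvDpMid a b i 0) by
    rw [h a.length le_rfl]
  intro i hi
  induction i with
  | zero =>
    simp only [List.range_zero, List.foldl_nil]
    have h1 : pvMkTab a.length b.length (fun _ _ => (0 : Int))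
        = pvMkTab a.length b.length (gCellA a b 0 0) := by
      refine pvMkTab_congr (fun k hk l hl => ?_)
      unfold gCellA
      rw [if_neg (by omega)]
    have h2 : List.replicate b.length (0 : Int) = pvDpMid a b 0 0 := by
      unfold pvDpMid pvDpS
      simp [pvCmax, List.map_const']
    rw [h1, h2]
  | succ i ih =>
    rw [List.range_succ, List.foldl_append, ih (by omega)]
    simp only [List.foldl_cons, List.foldl_nil]
    rw [pvRowB a b i (by omega) b.length le_rfl]
    have h1 : pvMkTab a.length b.length (gCellA a b i b.length)
        = pvMkTab a.length b.length (gCellA a b (i + 1) 0) := gCellA_row_done a b i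
    have h2 : pvDpMid a b i b.length = pvDpMid a b (i + 1) 0 := by
      unfold pvDpMid
      refine List.map_congr_left (fun l hl => ?_)
      rw [if_pos (List.mem_range.mp hl), if_neg (by omega)]
    rw [h1, h2]

-- the two final scans agree cell by cell
theorem pvFinal_eq (a b : List Int) : LCMS a b = LCMS_alt a b := by
  simp only [LCMS, LCMS_alt]
  rw [PySem.List.slice?_none_none_neg_one, PySem.List.slice?_none_none_neg_one]
  simp only [Option.getD_some]
  rw [pvIncA_eq, pvDecA_eq, pvTable_eq, pvTable_eq]
  rw [PySem.List.pyRange_zero_nat a.length, PySem.List.pyRange_zero_nat b.length]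
  simp only [List.foldl_map, PySem.List.pyGetD_natCast]
  refine PySem.List.foldl_congr_mem _ _ _ _ (fun acc i hi => ?_)
  refine PySem.List.foldl_congr_mem _ _ _ _ (fun acc2 j hj => ?_)
  have him : i < a.length := List.mem_range.mp hi
  have hjn : j < b.length := List.mem_range.mp hj
  have hu : pvGet2 (pvMkTab a.length b.length (gCellA a b a.length 0)) (i : Int) (j : Int)
      = if a.getD i 0 = b.getD j 0 then pvT a b i j else 0 := by
    rw [pvGet2_mkTab him hjn]
    unfold gCellA
    exact if_congr ⟨fun h => h.2, fun h => ⟨Or.inl him, h⟩⟩ rfl rfl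
  have hd : pvGet2 (pvMkTab a.length b.length (gCellD a b 0 0)) (i : Int) (j : Int)
      = if a.getD i 0 = b.getD j 0 then
          pvT a.reverse b.reverse (a.length - 1 - i) (b.length - 1 - j) else 0 := by
    rw [pvGet2_mkTab him hjn]
    unfold gCellD
    exact if_congr ⟨fun h => h.2, fun h => ⟨by omega, h⟩⟩ rfl rfl
  have e1 : (a.length : Int) - 1 - (i : Int) = ((a.length - 1 - i : Nat) : Int) := by omega
  have e2 : (b.length : Int) - 1 - (j : Int) = ((b.length - 1 - j : Nat) : Int) := by omega
  have hrev : pvGet2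
        (pvMkTab a.reverse.length b.reverse.length (gCellA a.reverse b.reverse a.reverse.length 0))
        ((a.length : Int) - 1 - (i : Int)) ((b.length : Int) - 1 - (j : Int))
      = if a.getD i 0 = b.getD j 0 then
          pvT a.reverse b.reverse (a.length - 1 - i) (b.length - 1 - j) else 0 := by
    rw [e1, e2, pvGet2_mkTab (by rw [List.length_reverse]; omega) (by rw [List.length_reverse]; omega)]
    unfold gCellA
    have hmm : a.reverse.getD (a.length - 1 - i) 0 = b.reverse.getD (b.length - 1 - j) 0 ↔
        a.getD i 0 = b.getD j 0 := by
      rw [getD_reverse him, getD_reverse hjn]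
    refine if_congr ?_ rfl rfl
    rw [hmm]
    exact ⟨fun h => h.2, fun h => ⟨Or.inl (by rw [List.length_reverse]; omega), h⟩⟩
  rw [hu, hd, hrev]
  by_cases hm : a.getD i 0 = b.getD j 0
  · simp only [if_pos hm]
    exact if_congr ⟨fun h => h.2, fun h => ⟨hm, h⟩⟩ rfl rfl
  · simp only [if_neg hm]
    rw [if_neg (fun h => hm h.1), if_neg (fun (h : (1 : Int) < 0 ∧ (1 : Int) < 0) => by omega)]

-- ===== VERDICT (by name: the statement is the Claim_ definition above) =====
theorem LCMS_spec : Claim_equal_LCMS := by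
  unfold Claim_equal_LCMS
  intro a b _
  unfold Spec_LCMS
  exact pvFinal_eq a b
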